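-- pv_equiv track=rewrite | github.com/ngTwg/Branding-Focused | antigravity/scripts/install_skill.py | find_skill
-- ===== SOURCE A (Python) =====
-- def find_skill(items: list[dict], name: str) -> dict | None:
-- 	name_norm = name.strip().lower()
-- 	for item in items:
-- 		candidate = str(item.get("name") or "").strip().lower()
-- 		if candidate == name_norm:
-- 			return item
-- 	for item in items:
-- 		candidate = str(item.get("name") or "").strip().lower()
-- 		if name_norm in candidate:
-- 			return item
-- 	return None
-- ===== SOURCE B (Python) =====
-- def find_skill(items: list, name: str):
--     name_norm = name.strip().lower()
--     sub_hit = None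
--     for item in items:
--         candidate = str(item.get("name") or "").strip().lower()
--         if candidate == name_norm:
--             return item
--         if sub_hit is None and name_norm in candidate:
--             sub_hit = item
--     return sub_hit
-- ===== Notes on version B (the rewrite author's own statement) =====
-- stated objective: simpler
-- what changed: Folds A's two sequential full scans into one single pass that returns immediately on an exact normalized match and otherwise records only the first substring match in an accumulator.
import Mathlib
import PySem

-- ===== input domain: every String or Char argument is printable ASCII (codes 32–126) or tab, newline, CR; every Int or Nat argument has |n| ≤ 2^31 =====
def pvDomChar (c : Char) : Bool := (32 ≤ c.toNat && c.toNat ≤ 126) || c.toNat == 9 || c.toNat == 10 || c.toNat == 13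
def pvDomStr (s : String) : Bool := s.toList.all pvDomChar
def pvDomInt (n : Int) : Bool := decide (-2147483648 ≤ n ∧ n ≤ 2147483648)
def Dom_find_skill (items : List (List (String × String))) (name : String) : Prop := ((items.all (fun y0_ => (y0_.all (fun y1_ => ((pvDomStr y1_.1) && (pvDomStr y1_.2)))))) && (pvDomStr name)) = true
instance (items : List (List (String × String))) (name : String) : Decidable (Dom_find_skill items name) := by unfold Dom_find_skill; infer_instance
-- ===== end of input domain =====

-- B folds A's two sequential scans into one pass with a first-substring-match accumulator (simpler; same cost).

-- ===== PORT A =====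
-- candidate = str(item.get("name") or "").strip().lower()  ('x or ""' maps None and "" to ""; str() is identity on str)
def pvCandA (item : List (String × String)) : String :=
  PySem.Str.lower (PySem.Str.strip (PySem.Dict.getD ⟨item⟩ "name" ""))

-- first loop: return item on exact match
def pvLoopExact (nn : String) : List (List (String × String)) → Option (List (String × String))
  | [] => none
  | item :: rest => if pvCandA item == nn then some item else pvLoopExact nn rest

-- second loop: return item on substring match
def pvLoopSub (nn : String) : List (List (String × String)) → Option (List (String × String))
  | [] => none
  | item :: rest => if PySem.Str.isIn nn (pvCandA item) then some item else pvLoopSub nn rest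

def find_skill (items : List (List (String × String))) (name : String) : Option (List (String × String)) :=
  let nn := PySem.Str.lower (PySem.Str.strip name)
  match pvLoopExact nn items with
  | some it => some it
  | none => pvLoopSub nn items

-- ===== PORT B =====
def pvCandB (item : List (String × String)) : String :=
  PySem.Str.lower (PySem.Str.strip (PySem.Dict.getD ⟨item⟩ "name" ""))

-- single pass: return on exact match; record first substring match in sub_hit
def pvLoopB (nn : String) (subHit : Option (List (String × String))) :
    List (List (String × String)) → Option (List (String × String))
  | [] => subHit
  | item :: rest =>
      let c := pvCandB item
      if c == nn then some item
      else pvLoopB nn (if subHit.isNone && PySem.Str.isIn nn c then some item else subHit) rest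

def find_skill_alt (items : List (List (String × String))) (name : String) : Option (List (String × String)) :=
  pvLoopB (PySem.Str.lower (PySem.Str.strip name)) none items

-- ===== PRECONDITION & SPEC =====
def Spec_find_skill (items : List (List (String × String))) (name : String) (out : Option (List (String × String))) : Prop := out = find_skill_alt items name
instance (items : List (List (String × String))) (name : String) (out : Option (List (String × String))) : Decidable (Spec_find_skill items name out) := by unfold Spec_find_skill; infer_instance

-- ===== CLAIM (what is proved, stated in full; the proofs are below) =====
def Claim_equal_find_skill : Prop := ∀ (items : List (List (String × String))) (name : String), Dom_find_skill items name → Spec_find_skill items name (find_skill items name)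

-- ===== LEMMAS AND PROOFS =====
theorem pvLoopB_eq (nn : String) (items : List (List (String × String)))
    (acc : Option (List (String × String))) :
    pvLoopB nn acc items =
      match pvLoopExact nn items with
      | some it => some it
      | none => match acc with
                | some a => some a
                | none => pvLoopSub nn items := by
  induction items generalizing acc with
  | nil => cases acc <;> simp [pvLoopB, pvLoopExact, pvLoopSub]
  | cons item rest ih =>
      have hc : pvCandB item = pvCandA item := rfl
      simp only [pvLoopB, pvLoopExact, pvLoopSub, hc]
      by_cases hx : pvCandA item == nn
      · simp [hx]
      · simp only [hx, Bool.false_eq_true, if_false, ih]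
        cases acc with
        | some a => simp
        | none =>
            simp only [Option.isNone_none, Bool.true_and]
            by_cases hs : PySem.Str.isIn nn (pvCandA item)
            · simp only [hs, if_true]
            · simp only [hs, Bool.false_eq_true, if_false]

-- ===== VERDICT (by name: the statement is the Claim_ definition above) =====
theorem find_skill_spec : Claim_equal_find_skill := by
  intro items name _
  unfold Spec_find_skill find_skill find_skill_alt
  rw [pvLoopB_eq]
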